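-- pv_equiv track=rewrite | github.com/Prasanthipandrada/codemind-python | Abundant_Numbers.py | abundant_number
-- ===== SOURCE A (Python) =====
-- def abundant_number(n):
--     s=0
--     op=''
--     for i in range(1,n,1):
--         if n%i==0:
--             s=s+i
--     if s>n:
--         op=True
--     else:
--         op=False
--     return op
-- ===== SOURCE B (Python) =====
-- def abundant_number(n):
--     s = 0
--     if n > 1:
--         i = 1
--         while i * i <= n:
--             if n % i == 0:
--                 s += i
--                 j = n // i
--                 if j != i and j < n:
--                     s += j
--             i += 1
--     return s > n
-- ===== Notes on version B (the rewrite author's own statement) =====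
-- stated objective: faster
-- what changed: B sums proper divisors by iterating only up to sqrt(n) and adding each divisor together with its cofactor pair, instead of A's scan over every i < n.
import Mathlib
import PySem

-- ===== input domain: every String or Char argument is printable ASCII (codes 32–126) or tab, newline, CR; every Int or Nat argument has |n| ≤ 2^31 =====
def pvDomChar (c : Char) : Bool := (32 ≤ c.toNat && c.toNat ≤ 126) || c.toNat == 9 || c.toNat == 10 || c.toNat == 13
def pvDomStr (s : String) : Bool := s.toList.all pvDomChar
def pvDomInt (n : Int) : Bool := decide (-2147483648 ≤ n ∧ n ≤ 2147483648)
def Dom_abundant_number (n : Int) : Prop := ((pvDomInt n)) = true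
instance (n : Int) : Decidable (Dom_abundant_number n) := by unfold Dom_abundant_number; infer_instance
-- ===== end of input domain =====

-- B replaces A's scan over every i < n by a loop up to sqrt(n) adding each divisor with its
-- cofactor pair (objective: faster, asymptotically O(sqrt n) vs O(n)).

-- ===== PORT A =====
def abundant_number (n : Int) : Bool :=
  let s := (PySem.List.pyRange 1 n 1).foldl
    (fun s i => if PySem.Int.mod n i = 0 then s + i else s) 0
  if s > n then true else false

-- ===== PORT B =====
-- termination: i ≤ i*i ≤ n, so n + 1 - i decreases and stays positive while the guard holds
def abLoopLe (i : Int) : i ≤ i * i := by nlinarith [sq_nonneg i, sq_nonneg (i - 1)]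

def abLoop (n i s : Int) : Int :=
  if _h : i * i ≤ n then
    abLoop n (i + 1)
      (if PySem.Int.mod n i = 0 then
        let j := PySem.Int.floordiv n i
        (s + i) + (if j ≠ i ∧ j < n then j else 0)
      else s)
  else s
termination_by (n + 1 - i).toNat
decreasing_by
  have := abLoopLe i
  omega

def abundant_number_alt (n : Int) : Bool :=
  let s := if n > 1 then abLoop n 1 0 else 0
  decide (s > n)

-- ===== PRECONDITION & SPEC =====
def Spec_abundant_number (n : Int) (out : Bool) : Prop := out = abundant_number_alt n
instance (n : Int) (out : Bool) : Decidable (Spec_abundant_number n out) := by unfold Spec_abundant_number; infer_instance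

-- ===== CLAIM (what is proved, stated in full; the proofs are below) =====
def Claim_equal_abundant_number : Prop := ∀ (n : Int), Dom_abundant_number n → Spec_abundant_number n (abundant_number n)

-- ===== LEMMAS AND PROOFS =====

-- the Nat-valued summands of the two loops
def pvGA (N d : ℕ) : ℕ := if d ∣ N then d else 0
def pvGB (N d : ℕ) : ℕ :=
  if d * d ≤ N ∧ d ∣ N then d + (if N / d ≠ d ∧ N / d < N then N / d else 0) else 0

-- A's fold computes the proper-divisor sum (as a Finset sum over Nat)
lemma foldA_eq (n a s : Int) (ha : 1 ≤ a) (hn : 0 ≤ n) :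
    (PySem.List.pyRange a n 1).foldl
      (fun s i => if PySem.Int.mod n i = 0 then s + i else s) s
    = s + ((∑ d ∈ Finset.Ico a.toNat n.toNat, pvGA n.toNat d : ℕ) : Int) := by
  obtain ⟨N, rfl⟩ : ∃ N : ℕ, n = (N : Int) := ⟨n.toNat, (Int.toNat_of_nonneg hn).symm⟩
  obtain ⟨A, rfl⟩ : ∃ A : ℕ, a = (A : Int) := ⟨a.toNat, (Int.toNat_of_nonneg (by omega)).symm⟩
  simp only [Int.toNat_natCast]
  by_cases hab : (A : Int) < N
  · rw [PySem.List.pyRange_one_cons hab]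
    simp only [List.foldl_cons]
    rw [show ((A : Int) + 1) = ((A + 1 : ℕ) : Int) by push_cast; ring]
    rw [foldA_eq (N : Int) ((A + 1 : ℕ) : Int) _ (by push_cast; omega) hn]
    simp only [Int.toNat_natCast]
    rw [Finset.sum_eq_sum_Ico_succ_bot (show A < N by exact_mod_cast hab) (pvGA N)]
    have hdvd : PySem.Int.mod (N : Int) (A : Int) = 0 ↔ A ∣ N := by
      rw [PySem.Int.mod_eq_zero_iff_dvd]; exact Int.natCast_dvd_natCast
    by_cases hd : A ∣ N
    · rw [if_pos (hdvd.mpr hd)]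
      simp only [pvGA, if_pos hd]
      push_cast
      ring
    · rw [if_neg (fun hc => hd (hdvd.mp hc))]
      simp only [pvGA, if_neg hd]
      simp
  · rw [PySem.List.pyRange_one_eq_nil (by omega),
        Finset.Ico_eq_empty (show ¬ A < N by exact_mod_cast hab)]
    simp
termination_by (n - a).toNat

-- B's loop invariant
lemma abLoop_eq (n i s : Int) (hi : 1 ≤ i) (hn : 2 ≤ n) :
    abLoop n i s = s + ((∑ d ∈ Finset.Ico i.toNat (n.toNat + 1), pvGB n.toNat d : ℕ) : Int) := by
  obtain ⟨N, rfl⟩ : ∃ N : ℕ, n = (N : Int) := ⟨n.toNat, (Int.toNat_of_nonneg (by omega)).symm⟩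
  obtain ⟨I, rfl⟩ : ∃ I : ℕ, i = (I : Int) := ⟨i.toNat, (Int.toNat_of_nonneg (by omega)).symm⟩
  have hI1 : 1 ≤ I := by exact_mod_cast hi
  simp only [Int.toNat_natCast]
  rw [abLoop]
  by_cases hii : (I : Int) * I ≤ N
  · rw [dif_pos hii]
    have hIN : I * I ≤ N := by exact_mod_cast hii
    have hIle : I ≤ I * I := Nat.le_mul_of_pos_left I hI1
    rw [show ((I : Int) + 1) = ((I + 1 : ℕ) : Int) by push_cast; ring]
    rw [abLoop_eq (N : Int) ((I + 1 : ℕ) : Int) _ (by push_cast; omega) hn]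
    simp only [Int.toNat_natCast]
    rw [Finset.sum_eq_sum_Ico_succ_bot (show I < N + 1 by omega) (pvGB N)]
    have hdvd : PySem.Int.mod (N : Int) (I : Int) = 0 ↔ I ∣ N := by
      rw [PySem.Int.mod_eq_zero_iff_dvd]; exact Int.natCast_dvd_natCast
    by_cases hd : I ∣ N
    · rw [if_pos (hdvd.mpr hd)]
      have hdiv : PySem.Int.floordiv (N : Int) (I : Int) = ((N / I : ℕ) : Int) := by
        rw [PySem.Int.floordiv_eq_ediv_of_pos (by exact_mod_cast hI1)]
        exact (Int.natCast_ediv N I).symm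
      rw [hdiv]
      simp only [pvGB, if_pos (And.intro hIN hd)]
      by_cases hc : N / I ≠ I ∧ N / I < N
      · rw [if_pos ⟨by exact_mod_cast hc.1, by exact_mod_cast hc.2⟩, if_pos hc]
        push_cast
        ring
      · rw [if_neg (fun h => hc ⟨by exact_mod_cast h.1, by exact_mod_cast h.2⟩), if_neg hc]
        push_cast
        ring
    · rw [if_neg (fun hc => hd (hdvd.mp hc))]
      simp only [pvGB, hd, and_false, if_false]
      simp
  · rw [dif_neg hii]
    have hz : ∑ d ∈ Finset.Ico I (N + 1), pvGB N d = 0 := by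
      apply Finset.sum_eq_zero
      intro d hd
      simp only [Finset.mem_Ico] at hd
      have h1 : N < I * I := by exact_mod_cast (not_le.mp hii)
      have h3 : I * I ≤ d * d := Nat.mul_le_mul hd.1 hd.1
      simp only [pvGB]
      rw [if_neg]
      rintro ⟨hle, -⟩
      omega
    rw [hz]
    simp
termination_by (n + 1 - i).toNat
decreasing_by
  have := abLoopLe i
  omega

-- the pairing identity: summing d and its cofactor over d ≤ √N gives the proper-divisor sum
lemma sum_pvGB_eq (N : ℕ) (hN : 2 ≤ N) :
    ∑ d ∈ Finset.Ico 1 (N + 1), pvGB N d = ∑ d ∈ Finset.Ico 1 N, pvGA N d := by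
  have h0 : N ≠ 0 := by omega
  have hA : ∑ d ∈ Finset.Ico 1 N, pvGA N d = ∑ d ∈ N.properDivisors, d := by
    rw [show N.properDivisors = Finset.filter (· ∣ N) (Finset.Ico 1 N) from rfl,
        Finset.sum_filter]
    exact Finset.sum_congr rfl (fun d _ => rfl)
  have hB : ∑ d ∈ Finset.Ico 1 (N + 1), pvGB N d
      = ∑ d ∈ N.divisors.filter (fun d => d * d ≤ N),
          (d + if N / d ≠ d ∧ N / d < N then N / d else 0) := by
    rw [show N.divisors = Finset.filter (· ∣ N) (Finset.Ico 1 (N + 1)) from rfl,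
        Finset.filter_filter, Finset.sum_filter]
    apply Finset.sum_congr rfl
    intro d _
    by_cases h1 : d ∣ N <;> by_cases h2 : d * d ≤ N <;> simp [pvGB, h1, h2]
  have hsplit : ∑ d ∈ N.properDivisors, d
      = ∑ d ∈ N.properDivisors.filter (fun d => d * d ≤ N), d
      + ∑ d ∈ N.properDivisors.filter (fun d => ¬ d * d ≤ N), d :=
    (Finset.sum_filter_add_sum_filter_not _ _ _).symm
  have hsmall : N.properDivisors.filter (fun d => d * d ≤ N)
      = N.divisors.filter (fun d => d * d ≤ N) := by
    ext d
    simp only [Finset.mem_filter, Nat.mem_properDivisors, Nat.mem_divisors]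
    constructor
    · rintro ⟨⟨hdvd, -⟩, hsq⟩; exact ⟨⟨hdvd, h0⟩, hsq⟩
    · rintro ⟨⟨hdvd, -⟩, hsq⟩
      refine ⟨⟨hdvd, ?_⟩, hsq⟩
      have hdle := Nat.le_of_dvd (by omega) hdvd
      rcases eq_or_lt_of_le hdle with rfl | h
      · nlinarith
      · exact h
  have hite : ∑ d ∈ N.divisors.filter (fun d => d * d ≤ N),
        (if N / d ≠ d ∧ N / d < N then N / d else 0)
      = ∑ d ∈ (N.divisors.filter (fun d => d * d ≤ N)).filter
          (fun d => N / d ≠ d ∧ N / d < N), N / d := (Finset.sum_filter _ _).symm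
  have hbij : ∑ d ∈ (N.divisors.filter (fun d => d * d ≤ N)).filter
        (fun d => N / d ≠ d ∧ N / d < N), N / d
      = ∑ d ∈ N.properDivisors.filter (fun d => ¬ d * d ≤ N), d := by
    apply Finset.sum_nbij' (i := fun d => N / d) (j := fun d => N / d)
    · intro d hd
      simp only [Finset.mem_filter, Nat.mem_divisors] at hd
      obtain ⟨⟨⟨hdvd, -⟩, hsq⟩, hne, hlt⟩ := hd
      have dpos : 0 < d := Nat.pos_of_dvd_of_pos hdvd (by omega)
      have hq : d * (N / d) = N := Nat.mul_div_cancel' hdvd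
      have hdq : d < N / d := by
        rcases lt_trichotomy d (N / d) with h | h | h
        · exact h
        · exact absurd h.symm hne
        · nlinarith
      simp only [Finset.mem_filter, Nat.mem_properDivisors]
      exact ⟨⟨Nat.div_dvd_of_dvd hdvd, hlt⟩, by nlinarith⟩
    · intro e he
      simp only [Finset.mem_filter, Nat.mem_properDivisors] at he
      obtain ⟨⟨hdvd, hlt⟩, hsq⟩ := he
      have epos : 0 < e := Nat.pos_of_dvd_of_pos hdvd (by omega)
      have hp : e * (N / e) = N := Nat.mul_div_cancel' hdvd
      have ppos : 0 < N / e := Nat.div_pos (Nat.le_of_dvd (by omega) hdvd) epos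
      have hpe : N / e < e := by nlinarith
      have hback : N / (N / e) = e := Nat.div_div_self hdvd h0
      simp only [Finset.mem_filter, Nat.mem_divisors]
      exact ⟨⟨⟨Nat.div_dvd_of_dvd hdvd, h0⟩, by nlinarith⟩, by rw [hback]; omega⟩
    · intro d hd
      simp only [Finset.mem_filter, Nat.mem_divisors] at hd
      exact Nat.div_div_self hd.1.1.1 h0
    · intro e he
      simp only [Finset.mem_filter, Nat.mem_properDivisors] at he
      exact Nat.div_div_self he.1.1 h0
    · intro d _
      rfl
  rw [hA, hB, Finset.sum_add_distrib, hite, hbij, hsplit, hsmall]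

-- ===== VERDICT (by name: the statement is the Claim_ definition above) =====
theorem abundant_number_spec : Claim_equal_abundant_number := by
  intro n _
  unfold Spec_abundant_number abundant_number abundant_number_alt
  by_cases h2 : 2 ≤ n
  · rw [if_pos (by omega : n > 1)]
    rw [foldA_eq n 1 0 le_rfl (by omega), abLoop_eq n 1 0 le_rfl h2]
    simp only [Int.toNat_one, sum_pvGB_eq n.toNat (by omega)]
    split_ifs with h0
    · simp
      push_cast at h0
      omega
    · simp
      push_cast at h0
      omega
  · rw [PySem.List.pyRange_one_eq_nil (by omega)]
    simp [show ¬ (1:Int) < n by omega]
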